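-- pv_equiv track=rewrite | github.com/Viciooo/WDI_zestawy | Zestaw_4.py | ex6
-- ===== SOURCE A (Python) =====
-- def RowsByFirstIndexSort(t):
--     #tmp = 0
--     for r in range(1,len(t)):
--         #j = r
--         while r > 0 and t[r][0] < t[r-1][0]:
--             t[r-1], t[r] = t[r], t[r-1]
--             r -= 1
--     return t
--
-- def ex6(t,T2):
-- #Zadanie 6. Dane sa dwie tablice mogace pomiescic taka sama liczbe elementów: T1[N][N] i T2[M], gdzie
-- #M=N*N. W kazdym wierszu tablicy T1 znajduja sie uporzadkowane rosnaco (w obrebie wiersza) liczby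
-- #naturalne. Prosze napisac funkcje przepisujaca wszystkie singletony (liczby wystepujace dokładnie raz) z
-- #tablicy T1 do T2, tak aby liczby w tablicy T2 były uporzadkowane rosnaco. Pozostałe elementy tablicy T2
-- #powinny zawierac zera.
--
--     tmp = -1
--     i = 0
--
--     while len(t) > 1:
--
--         if len(t[0]) == 0:
--                 del t[0]
--                 continue
--
--         elif len(t[1]) == 0:
--                 del t[1]
--                 continue
--
--         t = RowsByFirstIndexSort(t)
--
--         if t[0][0] == tmp:
--             del t[0][0]
--
--         elif t[1][0] == t[0][0]:
--             tmp = t[0][0]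
--             del t[0][0],t[1][0]
--
--         else:
--             T2[i] = t[0][0]
--             del t[0][0]
--
--             if len(t[0]) == 0:
--                 del t[0]
--
--             i += 1
--
--     for j in range(len(t[0])):
--         T2[i] = t[0][j]
--         i += 1
--
--     return T2
-- ===== SOURCE B (Python) =====
-- def ex6(t, T2):
--     # Merge the rows through a single sorted worklist of (row, start) cursors,
--     # maintained incrementally, instead of re-running a full insertion sort of
--     # all rows on every step as A does.  Reads the rows without mutating t
--     # (A consumes t destructively); writes the results into T2 like A.
--
--     def head(item):
--         row, s = item
--         return row[s]
--
--     def reinsert(work, item):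
--         # fresh cursor goes BEFORE entries with an equal head
--         k = 0
--         while k < len(work) and head(work[k]) < head(item):
--             k += 1
--         work.insert(k, item)
--
--     work = []
--     for row in t:
--         if row:
--             # initial build is a stable sort: AFTER entries with an equal head
--             k = 0
--             while k < len(work) and head(work[k]) <= row[0]:
--                 k += 1
--             work.insert(k, (row, 0))
--
--     tmp = -1
--     i = 0
--     while len(work) >= 2:
--         row0, s0 = work[0]
--         h0 = row0[s0]
--         if h0 == tmp:
--             del work[0]
--             if s0 + 1 < len(row0):
--                 reinsert(work, (row0, s0 + 1))
--         else:
--             row1, s1 = work[1]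
--             if row1[s1] == h0:
--                 tmp = h0
--                 del work[0]
--                 del work[0]
--                 if s1 + 1 < len(row1):
--                     reinsert(work, (row1, s1 + 1))
--                 if s0 + 1 < len(row0):
--                     reinsert(work, (row0, s0 + 1))
--             else:
--                 T2[i] = h0
--                 i += 1
--                 del work[0]
--                 if s0 + 1 < len(row0):
--                     reinsert(work, (row0, s0 + 1))
--
--     if work:
--         row, s = work[0]
--         for v in row[s:]:
--             T2[i] = v
--             i += 1
--     return T2
-- ===== Notes on version B (the rewrite author's own statement) =====
-- stated objective: alternative
-- what changed: B merges the rows through a single sorted worklist of (row,start) cursors maintained by incremental insertion at the correct position, instead of A's re-running a full insertion sort of all rows and deleting list fronts on every loop iteration; B also reads rows via cursors without mutating t (A consumes t destructively); return value is identical.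
-- outside the precondition, e.g. on ex6([[1], [1]], [0]): A returns [0], B returns [0]
import Mathlib
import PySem

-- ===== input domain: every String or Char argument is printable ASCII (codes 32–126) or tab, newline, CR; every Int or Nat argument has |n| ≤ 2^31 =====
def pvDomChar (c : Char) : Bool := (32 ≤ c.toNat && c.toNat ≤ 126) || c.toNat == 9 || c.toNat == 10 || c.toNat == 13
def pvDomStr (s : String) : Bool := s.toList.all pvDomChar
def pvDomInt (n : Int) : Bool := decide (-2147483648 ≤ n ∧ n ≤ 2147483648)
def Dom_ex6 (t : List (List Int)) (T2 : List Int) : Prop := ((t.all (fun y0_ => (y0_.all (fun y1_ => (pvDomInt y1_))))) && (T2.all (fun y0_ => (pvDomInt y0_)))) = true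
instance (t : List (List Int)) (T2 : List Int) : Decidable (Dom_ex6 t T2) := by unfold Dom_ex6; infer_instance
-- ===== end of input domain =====

-- B replaces A's per-iteration full insertion sort + list-front deletions by one
-- incrementally maintained sorted worklist of (row, cursor) pairs (alternative
-- structure, same cost class). A mutates t and T2 in place, B only T2; the
-- equivalence proved here is about the return value.


-- ===== PORT A =====
-- RowsByFirstIndexSort: in-place insertion sort of the rows by first element.
-- The swap-based inner while loop inserts t[r] into the (always sorted) prefix
-- after every row with head ≤ t[r][0]; `insRowA` is that insertion.
def insRowA (x : List Int) : List (List Int) → List (List Int)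
  | [] => [x]
  | y :: ys => if x.headD 0 < y.headD 0 then x :: y :: ys else y :: insRowA x ys

def sortRowsA (t : List (List Int)) : List (List Int) :=
  match t with
  | [] => []
  | h :: rest => rest.foldl (fun acc x => insRowA x acc) [h]

-- termination measure of A's while loop: total element count + row count
def msrA (t : List (List Int)) : Nat := (t.map List.length).sum + t.length

-- port of A's `while len(t) > 1` loop; returns (t, T2, i) at exit.
-- `fuel` is a totalisation guard only: ex6 supplies msrA t + 1, which the
-- lemmas below show is always enough (each iteration strictly decreases msrA).
def loopA (fuel : Nat) (t : List (List Int)) (T2 : List Int) (tmp : Int) (i : Nat) :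
    List (List Int) × List Int × Nat :=
  match fuel with
  | 0 => (t, T2, i)
  | fuel + 1 =>
    match t with
    | [] => ([], T2, i)
    | [t0] => ([t0], T2, i)
    | t0 :: t1 :: rest =>
      if t0.length = 0 then loopA fuel (t1 :: rest) T2 tmp i
      else if t1.length = 0 then loopA fuel (t0 :: rest) T2 tmp i
      else
        match sortRowsA (t0 :: t1 :: rest) with
        | [] => ([], T2, i)
        | [u0] => ([u0], T2, i)
        | u0 :: u1 :: rs =>
          if u0.length = 0 then (u0 :: u1 :: rs, T2, i)
            -- totalisation guard: Python raises IndexError here (an empty row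
            -- reached the sort); unreachable under Pre_ex6
          else if u0.headD 0 = tmp then loopA fuel (u0.drop 1 :: u1 :: rs) T2 tmp i
          else if u1.headD 0 = u0.headD 0 then
            loopA fuel (u0.drop 1 :: u1.drop 1 :: rs) T2 (u0.headD 0) i
          else
            if (u0.drop 1).length = 0 then
              loopA fuel (u1 :: rs) (T2.set i (u0.headD 0)) tmp (i + 1)
            else loopA fuel (u0.drop 1 :: u1 :: rs) (T2.set i (u0.headD 0)) tmp (i + 1)

-- port of the final `for j in range(len(t[0])): T2[i] = t[0][j]; i += 1`
def writeRowA (row : List Int) (i : Nat) (T2 : List Int) : List Int :=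
  match row with
  | [] => T2
  | v :: vs => writeRowA vs (i + 1) (T2.set i v)

def ex6 (t : List (List Int)) (T2 : List Int) : List Int :=
  let r := loopA (msrA t + 1) t T2 (-1) 0
  writeRowA (r.1.headD []) r.2.2 r.2.1

-- ===== PORT B =====
-- worklist items are (row, start) cursors; head = row[start]
def headP (it : List Int × Nat) : Int := it.1.getD it.2 0

-- Source B `reinsert`: before entries with an equal head
def insFresh (it : List Int × Nat) : List (List Int × Nat) → List (List Int × Nat)
  | [] => [it]
  | w :: ws => if headP w < headP it then w :: insFresh it ws else it :: w :: ws

-- Source B initial build insertion: after entries with an equal head (stable)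
def insStable (it : List Int × Nat) : List (List Int × Nat) → List (List Int × Nat)
  | [] => [it]
  | w :: ws => if headP w ≤ headP it then w :: insStable it ws else it :: w :: ws

def buildB (t : List (List Int)) : List (List Int × Nat) :=
  t.foldl (fun work row => if row.length = 0 then work else insStable (row, 0) work) []

-- termination measure of B's while loop
def msrB (work : List (List Int × Nat)) : Nat :=
  (work.map (fun it => it.1.length - it.2 + 1)).sum

-- port of Source B's `while len(work) >= 2` loop; `fuel` is a totalisation guard
-- only: ex6_alt supplies msrB work + 1, always enough (msrB strictly decreases).
def loopB (fuel : Nat) (work : List (List Int × Nat)) (T2 : List Int) (tmp : Int) (i : Nat) :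
    List (List Int × Nat) × List Int × Nat :=
  match fuel with
  | 0 => (work, T2, i)
  | fuel + 1 =>
    match work with
    | [] => ([], T2, i)
    | [w] => ([w], T2, i)
    | w0 :: w1 :: ws =>
      let h0 := w0.1.getD w0.2 0
      if h0 = tmp then
        loopB fuel (if w0.2 + 1 < w0.1.length then insFresh (w0.1, w0.2 + 1) (w1 :: ws)
               else (w1 :: ws)) T2 tmp i
      else if w1.1.getD w1.2 0 = h0 then
        let work1 := if w1.2 + 1 < w1.1.length then insFresh (w1.1, w1.2 + 1) ws else ws
        let work2 := if w0.2 + 1 < w0.1.length then insFresh (w0.1, w0.2 + 1) work1 else work1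
        loopB fuel work2 T2 h0 i
      else
        loopB fuel (if w0.2 + 1 < w0.1.length then insFresh (w0.1, w0.2 + 1) (w1 :: ws)
               else (w1 :: ws)) (T2.set i h0) tmp (i + 1)

-- port of Source B's final `for v in row[s:]: T2[i] = v; i += 1`
def writeRowB (row : List Int) (i : Nat) (T2 : List Int) : List Int :=
  (row.foldl (fun (p : List Int × Nat) v => (p.1.set p.2 v, p.2 + 1)) (T2, i)).1

def ex6_alt (t : List (List Int)) (T2 : List Int) : List Int :=
  let w := buildB t
  let r := loopB (msrB w + 1) w T2 (-1) 0
  match r.1 with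
  | [] => r.2.1
  | w :: _ => writeRowB (w.1.drop w.2) r.2.2 r.2.1

-- ===== PRECONDITION & SPEC =====
-- Pre_ex6 excludes exactly the IndexError sources: t = [] (A's final t[0]);
-- an empty row preceded by ≥ 2 nonempty rows (A's insertion sort reads r[0] of
-- every row, so such an empty row makes it raise; empty rows A deletes before
-- ever sorting are admitted); and T2 shorter than the total element count
-- (both programs write T2[i] past the end otherwise; the task guarantees
-- M = N*N).  On a few short-T2 inputs A still returns (see cites).
def Pre_ex6 (t : List (List Int)) (T2 : List Int) : Prop :=
  t ≠ [] ∧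
  (∀ k, k < t.length → t.getD k [] = [] →
    ((t.take k).filter (fun r => !r.isEmpty)).length ≤ 1) ∧
  (t.map List.length).sum ≤ T2.length
instance (t : List (List Int)) (T2 : List Int) : Decidable (Pre_ex6 t T2) := by
  unfold Pre_ex6; infer_instance

def pvWitness_ex6 : List (List Int) × List Int := ([[1, 2], [1, 3]], [0, 0, 0, 0])

def Spec_ex6 (t : List (List Int)) (T2 : List Int) (out : List Int) : Prop := out = ex6_alt t T2
instance (t : List (List Int)) (T2 : List Int) (out : List Int) : Decidable (Spec_ex6 t T2 out) := by unfold Spec_ex6; infer_instance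

-- ===== CLAIM (what is proved, stated in full; the proofs are below) =====
def Claim_equal_ex6 : Prop := ∀ (t : List (List Int)) (T2 : List Int), Dom_ex6 t T2 → Pre_ex6 t T2 → Spec_ex6 t T2 (ex6 t T2)

-- ===== LEMMAS AND PROOFS =====

theorem insRowA_perm (x : List Int) (l : List (List Int)) : List.Perm (insRowA x l) (x :: l) := by
  induction l with
  | nil => simp [insRowA]
  | cons y ys ih =>
    simp only [insRowA]
    split
    · exact List.Perm.refl _
    · exact (List.Perm.cons y ih).trans (List.Perm.swap x y ys)

theorem foldl_insRowA_perm (l acc : List (List Int)) :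
    List.Perm (l.foldl (fun acc x => insRowA x acc) acc) (acc ++ l) := by
  induction l generalizing acc with
  | nil => simp
  | cons y ys ih =>
    simp only [List.foldl_cons]
    refine (ih (insRowA y acc)).trans ?_
    have h1 : List.Perm (insRowA y acc ++ ys) ((y :: acc) ++ ys) :=
      (insRowA_perm y acc).append_right ys
    refine h1.trans ?_
    simpa using (List.perm_middle (a := y) (l₁ := acc) (l₂ := ys)).symm

theorem sortRowsA_perm (t : List (List Int)) : List.Perm (sortRowsA t) t := by
  cases t with
  | nil => simp [sortRowsA]
  | cons h rest => simpa using foldl_insRowA_perm rest [h]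

theorem msrA_sortRowsA (t : List (List Int)) : msrA (sortRowsA t) = msrA t := by
  have hp := sortRowsA_perm t
  unfold msrA
  rw [hp.length_eq, (hp.map List.length).sum_eq]

theorem msrA_cons (a : List Int) (l : List (List Int)) :
    msrA (a :: l) = a.length + 1 + msrA l := by
  simp [msrA]; omega

theorem msrB_insFresh (it : List Int × Nat) (w : List (List Int × Nat)) :
    ((insFresh it w).map (fun it => it.1.length - it.2 + 1)).sum
      = it.1.length - it.2 + 1 + (w.map (fun it => it.1.length - it.2 + 1)).sum := by
  induction w with
  | nil => simp [insFresh]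
  | cons x xs ih =>
    simp only [insFresh]
    split
    · simp only [List.map_cons, List.sum_cons, ih]; omega
    · simp only [List.map_cons, List.sum_cons]



-- proof-side machinery ------------------------------------------------------

def projW (w : List (List Int × Nat)) : List (List Int) := w.map (fun it => it.1.drop it.2)

def dumpA (r : List (List Int) × List Int × Nat) : List Int :=
  writeRowA (r.1.headD []) r.2.2 r.2.1

def dumpB (r : List (List Int × Nat) × List Int × Nat) : List Int :=
  match r.1 with
  | [] => r.2.1
  | w :: _ => writeRowB (w.1.drop w.2) r.2.2 r.2.1

def FA (t : List (List Int)) (T2 : List Int) (tmp : Int) (i : Nat) : List Int :=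
  dumpA (loopA (msrA t + 1) t T2 tmp i)

def FB (work : List (List Int × Nat)) (T2 : List Int) (tmp : Int) (i : Nat) : List Int :=
  dumpB (loopB (msrB work + 1) work T2 tmp i)

def SortedW (w : List (List Int × Nat)) : Prop :=
  List.Pairwise (fun a b => headP a ≤ headP b) w

def ValidW (w : List (List Int × Nat)) : Prop := ∀ it ∈ w, it.2 < it.1.length

def InvW (w : List (List Int × Nat)) : Prop := SortedW w ∧ ValidW w

def insLeft (x : List Int) : List (List Int) → List (List Int)
  | [] => [x]
  | y :: ys => if y.headD 0 < x.headD 0 then y :: insLeft x ys else x :: y :: ys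

def Bstep (r : List Int) (s : Nat) (w : List (List Int × Nat)) : List (List Int × Nat) :=
  if s < r.length then insFresh (r, s) w else w

def SortedR (l : List (List Int)) : Prop :=
  List.Pairwise (fun a b => a.headD 0 ≤ b.headD 0) l

def mergeR : List (List Int) → List (List Int) → List (List Int)
  | [], l => l
  | a :: as, [] => a :: as
  | a :: as, b :: bs =>
    if b.headD 0 < a.headD 0 then b :: mergeR (a :: as) bs else a :: mergeR as (b :: bs)
termination_by acc l => acc.length + l.length

theorem getD_headD (r : List Int) (s : Nat) : r.getD s 0 = (r.drop s).headD 0 := by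
  induction r generalizing s with
  | nil => simp
  | cons a as ih =>
    cases s with
    | zero => simp
    | succ m => simpa using ih m

theorem headP_proj (it : List Int × Nat) : headP it = (it.1.drop it.2).headD 0 := by
  simp [headP]

theorem writeAB (row : List Int) (i : Nat) (T2 : List Int) :
    writeRowA row i T2 = writeRowB row i T2 := by
  induction row generalizing i T2 with
  | nil => simp [writeRowA, writeRowB]
  | cons v vs ih =>
    simp only [writeRowA, writeRowB, List.foldl_cons] at ih ⊢
    exact ih (i + 1) (T2.set i v)

theorem proj_insFresh (it : List Int × Nat) (w : List (List Int × Nat)) :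
    projW (insFresh it w) = insLeft (it.1.drop it.2) (projW w) := by
  induction w with
  | nil => simp [insFresh, projW, insLeft]
  | cons x xs ih =>
    simp only [insFresh, projW, List.map_cons, insLeft, ← headP_proj]
    split
    · simpa [projW] using ih
    · rfl

theorem insFresh_min (it : List Int × Nat) (w : List (List Int × Nat))
    (h : ∀ u ∈ w, headP it ≤ headP u) : insFresh it w = it :: w := by
  cases w with
  | nil => rfl
  | cons x xs =>
    have := h x (by simp)
    simp [insFresh, not_lt.mpr this]

theorem mem_insFresh {x it : List Int × Nat} {w : List (List Int × Nat)}
    (h : x ∈ insFresh it w) : x = it ∨ x ∈ w := by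
  induction w with
  | nil => simpa [insFresh] using h
  | cons y ys ih =>
    simp only [insFresh] at h
    split at h
    · rcases List.mem_cons.mp h with h | h
      · exact Or.inr (by simp [h])
      · rcases ih h with h | h
        · exact Or.inl h
        · exact Or.inr (by simp [h])
    · rcases List.mem_cons.mp h with h | h
      · exact Or.inl h
      · exact Or.inr h

theorem sorted_insFresh (it : List Int × Nat) (w : List (List Int × Nat))
    (h : SortedW w) : SortedW (insFresh it w) := by
  induction w with
  | nil => simp [insFresh, SortedW]
  | cons x xs ih =>
    rcases (List.pairwise_cons.mp h) with ⟨hx, hxs⟩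
    simp only [insFresh]
    split
    · rename_i hlt
      refine List.pairwise_cons.mpr ⟨?_, ih hxs⟩
      intro u hu
      rcases mem_insFresh hu with rfl | hu
      · exact le_of_lt hlt
      · exact hx u hu
    · rename_i hge
      refine List.pairwise_cons.mpr ⟨?_, h⟩
      intro u hu
      rcases List.mem_cons.mp hu with rfl | hu
      · omega
      · exact le_trans (by omega) (hx u hu)

theorem valid_insFresh (it : List Int × Nat) (w : List (List Int × Nat))
    (h : ValidW w) (hit : it.2 < it.1.length) : ValidW (insFresh it w) := by
  intro u hu
  rcases mem_insFresh hu with rfl | hu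
  · exact hit
  · exact h u hu

theorem sortedR_proj (w : List (List Int × Nat)) (h : SortedW w) : SortedR (projW w) := by
  unfold SortedR projW
  rw [List.pairwise_map]
  exact h.imp (by intro a b hab; simpa [headP_proj] using hab)

theorem merge_nil_right (acc : List (List Int)) : mergeR acc [] = acc := by
  cases acc <;> simp [mergeR]

theorem merge_single_right (acc : List (List Int)) (y : List Int) :
    mergeR acc [y] = insRowA y acc := by
  induction acc with
  | nil => simp [mergeR, insRowA]
  | cons a as ih =>
    simp only [mergeR, insRowA]
    split
    · rfl
    · rw [ih]

theorem mg1 (x : List Int) (l : List (List Int)) : mergeR [x] l = insLeft x l := by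
  induction l with
  | nil => simp [mergeR, insLeft]
  | cons b bs ih =>
    simp only [mergeR, insLeft]
    split
    · rw [ih]
    · rfl

theorem insLeft_min (x : List Int) (l : List (List Int))
    (h : ∀ z ∈ l, x.headD 0 ≤ z.headD 0) : insLeft x l = x :: l := by
  cases l with
  | nil => rfl
  | cons b bs =>
    have := h b (by simp)
    simp only [insLeft]
    rw [if_neg (not_lt.mpr this)]

theorem insRowA_sorted (y : List Int) (acc : List (List Int)) (h : SortedR acc) :
    SortedR (insRowA y acc) := by
  induction acc with
  | nil => simp [insRowA, SortedR]
  | cons a as ih =>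
    rcases (List.pairwise_cons.mp h) with ⟨ha, has⟩
    simp only [insRowA]
    split
    · rename_i hlt
      refine List.pairwise_cons.mpr ⟨?_, h⟩
      intro z hz
      rcases List.mem_cons.mp hz with rfl | hz
      · omega
      · exact le_trans (by omega) (ha z hz)
    · rename_i hge
      refine List.pairwise_cons.mpr ⟨?_, ih has⟩
      intro z hz
      rcases List.mem_cons.mp ((insRowA_perm y as).mem_iff.mp hz) with h1 | h1
      · subst h1; omega
      · exact ha z h1

theorem mergeM2 (y : List Int) (ys acc : List (List Int)) (hacc : SortedR acc)
    (hy : ∀ z ∈ ys, y.headD 0 ≤ z.headD 0) :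
    mergeR (insRowA y acc) ys = mergeR acc (y :: ys) := by
  induction acc with
  | nil =>
    simp only [insRowA, mergeR]
    rw [mg1, insLeft_min y ys hy]
  | cons a as ih =>
    rcases (List.pairwise_cons.mp hacc) with ⟨ha, has⟩
    by_cases hya : y.headD 0 < a.headD 0
    · simp only [insRowA, if_pos hya]
      cases ys with
      | nil =>
        rw [merge_nil_right, merge_single_right]
        simp only [insRowA]
        rw [if_pos hya]
      | cons z zs =>
        have hyz := hy z (by simp)
        simp only [mergeR, if_pos hya, if_neg (not_lt.mpr hyz)]
    · simp only [insRowA, if_neg hya]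
      cases ys with
      | nil =>
        simp only [merge_nil_right, mergeR, if_neg hya]
        rw [merge_single_right]
      | cons z zs =>
        have hyz := hy z (by simp)
        have hza : ¬ z.headD 0 < a.headD 0 := by
          have := not_lt.mp hya; omega
        simp only [mergeR, if_neg hza, if_neg hya]
        rw [ih has]

theorem foldG (l : List (List Int)) : ∀ acc, SortedR l → SortedR acc →
    l.foldl (fun acc x => insRowA x acc) acc = mergeR acc l := by
  induction l with
  | nil => intro acc _ _; simp [merge_nil_right]
  | cons y ys ih =>
    intro acc hl hacc
    rcases (List.pairwise_cons.mp hl) with ⟨hy, hys⟩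
    simp only [List.foldl_cons]
    rw [ih (insRowA y acc) hys (insRowA_sorted y acc hacc), mergeM2 y ys acc hacc hy]

theorem mg2 (p q : List Int) (l : List (List Int)) (hpq : p.headD 0 ≤ q.headD 0) :
    mergeR [p, q] l = insLeft p (insLeft q l) := by
  induction l with
  | nil =>
    simp only [mergeR, insLeft]
    rw [if_neg (not_lt.mpr hpq)]
  | cons b bs ih =>
    by_cases hbq : b.headD 0 < q.headD 0
    · have e1 : insLeft q (b :: bs) = b :: insLeft q bs := by
        simp only [insLeft]; rw [if_pos hbq]
      by_cases hbp : b.headD 0 < p.headD 0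
      · simp only [mergeR]
        rw [if_pos hbp, ih, e1]
        simp only [insLeft]
        rw [if_pos hbp]
      · simp only [mergeR]
        rw [if_neg hbp, mg1, e1]
        simp only [insLeft]
        rw [if_neg hbp, if_pos hbq]
    · have hbp : ¬ b.headD 0 < p.headD 0 := by omega
      have e1 : insLeft q (b :: bs) = q :: b :: bs := by
        simp only [insLeft]; rw [if_neg hbq]
      simp only [mergeR]
      rw [if_neg hbp, mg1, e1]
      simp only [insLeft]
      rw [if_neg (not_lt.mpr hpq), if_neg hbq]

theorem insLeft_comm (a b : List Int) (l : List (List Int))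
    (hba : b.headD 0 < a.headD 0) :
    insLeft b (insLeft a l) = insLeft a (insLeft b l) := by
  induction l with
  | nil =>
    simp only [insLeft]
    rw [if_neg (not_lt.mpr (le_of_lt hba)), if_pos hba]
  | cons y ys ih =>
    by_cases hyb : y.headD 0 < b.headD 0
    · have hya : y.headD 0 < a.headD 0 := by omega
      have e1 : insLeft a (y :: ys) = y :: insLeft a ys := by
        simp only [insLeft]; rw [if_pos hya]
      have e2 : insLeft b (y :: ys) = y :: insLeft b ys := by
        simp only [insLeft]; rw [if_pos hyb]
      rw [e1, e2]
      simp only [insLeft]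
      rw [if_pos hya, if_pos hyb, ih]
    · have e2 : insLeft b (y :: ys) = b :: y :: ys := by
        simp only [insLeft]; rw [if_neg hyb]
      by_cases hya : y.headD 0 < a.headD 0
      · have e1 : insLeft a (y :: ys) = y :: insLeft a ys := by
          simp only [insLeft]; rw [if_pos hya]
        rw [e1, e2]
        simp only [insLeft]
        rw [if_neg hyb, if_pos hba, if_pos hya]
      · have e1 : insLeft a (y :: ys) = a :: y :: ys := by
          simp only [insLeft]; rw [if_neg hya]
        rw [e1, e2]
        simp only [insLeft]
        rw [if_neg (not_lt.mpr (le_of_lt hba)), if_pos hba, if_neg hya]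

theorem sortS2 (x : List Int) (l : List (List Int)) (hl : SortedR l) :
    sortRowsA (x :: l) = insLeft x l := by
  show (l.foldl (fun acc x => insRowA x acc) [x]) = _
  rw [foldG l [x] hl (by simp [SortedR]), mg1]

theorem sortS3 (a b : List Int) (l : List (List Int)) (hl : SortedR l) :
    sortRowsA (a :: b :: l) = insLeft a (insLeft b l) := by
  show (l.foldl (fun acc x => insRowA x acc) (insRowA b [a])) = _
  rw [foldG l (insRowA b [a]) hl (insRowA_sorted b [a] (by simp [SortedR]))]
  by_cases hba : b.headD 0 < a.headD 0
  · simp only [insRowA, if_pos hba]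
    rw [mg2 b a l (le_of_lt hba), insLeft_comm a b l hba]
  · simp only [insRowA, if_neg hba]
    rw [mg2 a b l (by omega)]

theorem msrB_cons (x : List Int × Nat) (xs : List (List Int × Nat)) :
    msrB (x :: xs) = x.1.length - x.2 + 1 + msrB xs := by
  unfold msrB
  rw [List.map_cons, List.sum_cons]

theorem msrB_ins (it : List Int × Nat) (w : List (List Int × Nat)) :
    msrB (insFresh it w) = it.1.length - it.2 + 1 + msrB w := by
  unfold msrB
  exact msrB_insFresh it w

theorem msrB_step_le (r : List Int) (s : Nat) (X : List (List Int × Nat)) :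
    msrB (if s + 1 < r.length then insFresh (r, s + 1) X else X)
      ≤ (r.length - s) + msrB X := by
  split
  · rw [msrB_ins]; dsimp only; omega
  · omega

theorem loopA_fuel (fuel : Nat) : ∀ (t : List (List Int)) (T2 : List Int) (tmp : Int) (i : Nat),
    msrA t < fuel → loopA fuel t T2 tmp i = loopA (msrA t + 1) t T2 tmp i := by
  induction fuel using Nat.strong_induction_on with
  | _ fuel IH =>
  intro t T2 tmp i hf
  cases fuel with
  | zero => omega
  | succ f =>
  cases t with
  | nil => simp [loopA]
  | cons t0 tl =>
  cases tl with
  | nil => simp [loopA]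
  | cons t1 rest =>
  have hstep : ∀ (t' : List (List Int)) (T2' : List Int) (tmp' : Int) (i' : Nat),
      msrA t' < msrA (t0 :: t1 :: rest) →
      loopA f t' T2' tmp' i' = loopA (msrA (t0 :: t1 :: rest)) t' T2' tmp' i' := by
    intro t' T2' tmp' i' hlt
    rw [IH f (by omega) t' T2' tmp' i' (by omega),
        IH (msrA (t0 :: t1 :: rest)) (by omega) t' T2' tmp' i' (by omega)]
  simp only [loopA]
  by_cases h0 : t0.length = 0
  · simp only [if_pos h0]
    exact hstep _ _ _ _ (by simp only [msrA_cons]; omega)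
  · simp only [if_neg h0]
    by_cases h1 : t1.length = 0
    · simp only [if_pos h1]
      exact hstep _ _ _ _ (by simp only [msrA_cons]; omega)
    · simp only [if_neg h1]
      cases hs : sortRowsA (t0 :: t1 :: rest) with
      | nil => rfl
      | cons u0 tl2 =>
      cases tl2 with
      | nil => rfl
      | cons u1 rs =>
      have hmeq := msrA_sortRowsA (t0 :: t1 :: rest)
      rw [hs] at hmeq
      dsimp only
      by_cases hu0 : u0.length = 0
      · simp only [if_pos hu0]
      · simp only [if_neg hu0]
        by_cases hc1 : u0.headD 0 = tmp
        · simp only [if_pos hc1]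
          exact hstep _ _ _ _ (by
            rw [msrA_cons, msrA_cons] at hmeq
            rw [msrA_cons, msrA_cons, List.length_drop]; omega)
        · simp only [if_neg hc1]
          by_cases hc2 : u1.headD 0 = u0.headD 0
          · simp only [if_pos hc2]
            exact hstep _ _ _ _ (by
              rw [msrA_cons, msrA_cons] at hmeq
              rw [msrA_cons, msrA_cons, List.length_drop, List.length_drop]; omega)
          · simp only [if_neg hc2]
            by_cases he : (u0.drop 1).length = 0
            · simp only [if_pos he]
              exact hstep _ _ _ _ (by
                rw [msrA_cons, msrA_cons] at hmeq
                rw [msrA_cons]; omega)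
            · simp only [if_neg he]
              exact hstep _ _ _ _ (by
                rw [msrA_cons, msrA_cons] at hmeq
                rw [msrA_cons, msrA_cons, List.length_drop]; omega)

theorem loopB_fuel (fuel : Nat) : ∀ (work : List (List Int × Nat)) (T2 : List Int) (tmp : Int) (i : Nat),
    msrB work < fuel → loopB fuel work T2 tmp i = loopB (msrB work + 1) work T2 tmp i := by
  induction fuel using Nat.strong_induction_on with
  | _ fuel IH =>
  intro work T2 tmp i hf
  cases fuel with
  | zero => omega
  | succ f =>
  cases work with
  | nil => simp [loopB]
  | cons w0 tl =>
  cases tl with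
  | nil => simp [loopB]
  | cons w1 ws =>
  have hstep : ∀ (w' : List (List Int × Nat)) (T2' : List Int) (tmp' : Int) (i' : Nat),
      msrB w' < msrB (w0 :: w1 :: ws) →
      loopB f w' T2' tmp' i' = loopB (msrB (w0 :: w1 :: ws)) w' T2' tmp' i' := by
    intro w' T2' tmp' i' hlt
    rw [IH f (by omega) w' T2' tmp' i' (by omega),
        IH (msrB (w0 :: w1 :: ws)) (by omega) w' T2' tmp' i' (by omega)]
  have hm01 : msrB (w0 :: w1 :: ws)
      = (w0.1.length - w0.2 + 1) + ((w1.1.length - w1.2 + 1) + msrB ws) := by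
    rw [msrB_cons, msrB_cons]
  simp only [loopB]
  by_cases hc1 : w0.1.getD w0.2 0 = tmp
  · simp only [if_pos hc1]
    refine hstep _ _ _ _ ?_
    have hx := msrB_step_le w0.1 w0.2 (w1 :: ws)
    rw [msrB_cons] at hx
    rw [hm01]
    omega
  · simp only [if_neg hc1]
    by_cases hc2 : w1.1.getD w1.2 0 = w0.1.getD w0.2 0
    · simp only [if_pos hc2]
      refine hstep _ _ _ _ ?_
      have h1 := msrB_step_le w1.1 w1.2 ws
      have h0 := msrB_step_le w0.1 w0.2
        (if w1.2 + 1 < w1.1.length then insFresh (w1.1, w1.2 + 1) ws else ws)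
      rw [hm01]
      omega
    · simp only [if_neg hc2]
      refine hstep _ _ _ _ ?_
      have hx := msrB_step_le w0.1 w0.2 (w1 :: ws)
      rw [msrB_cons] at hx
      rw [hm01]
      omega

theorem loopA_succ (f : Nat) (t0 t1 u0 u1 : List Int) (rest rs : List (List Int))
    (T2 : List Int) (tmp : Int) (i : Nat)
    (h0 : t0.length ≠ 0) (h1 : t1.length ≠ 0)
    (hs : sortRowsA (t0 :: t1 :: rest) = u0 :: u1 :: rs) (hu0 : u0.length ≠ 0) :
    loopA (f + 1) (t0 :: t1 :: rest) T2 tmp i =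
      if u0.headD 0 = tmp then loopA f (u0.drop 1 :: u1 :: rs) T2 tmp i
      else if u1.headD 0 = u0.headD 0 then loopA f (u0.drop 1 :: u1.drop 1 :: rs) T2 (u0.headD 0) i
      else if (u0.drop 1).length = 0 then loopA f (u1 :: rs) (T2.set i (u0.headD 0)) tmp (i+1)
      else loopA f (u0.drop 1 :: u1 :: rs) (T2.set i (u0.headD 0)) tmp (i+1) := by
  simp only [loopA, if_neg h0, if_neg h1, hs]
  simp only [if_neg hu0]

theorem FA_step (t0 t1 u0 u1 : List Int) (rest rs : List (List Int)) (T2 : List Int) (tmp : Int) (i : Nat)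
    (h0 : t0.length ≠ 0) (h1 : t1.length ≠ 0)
    (hs : sortRowsA (t0 :: t1 :: rest) = u0 :: u1 :: rs) (hu0 : u0.length ≠ 0) :
    FA (t0 :: t1 :: rest) T2 tmp i =
      if u0.headD 0 = tmp then FA (u0.drop 1 :: u1 :: rs) T2 tmp i
      else if u1.headD 0 = u0.headD 0 then FA (u0.drop 1 :: u1.drop 1 :: rs) T2 (u0.headD 0) i
      else if (u0.drop 1).length = 0 then FA (u1 :: rs) (T2.set i (u0.headD 0)) tmp (i+1)
      else FA (u0.drop 1 :: u1 :: rs) (T2.set i (u0.headD 0)) tmp (i+1) := by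
  have hmeq := msrA_sortRowsA (t0 :: t1 :: rest)
  rw [hs] at hmeq
  rw [msrA_cons, msrA_cons] at hmeq
  unfold FA
  rw [loopA_succ (msrA (t0 :: t1 :: rest)) t0 t1 u0 u1 rest rs T2 tmp i h0 h1 hs hu0]
  by_cases hc1 : u0.headD 0 = tmp
  · simp only [if_pos hc1]
    rw [loopA_fuel _ _ _ _ _ (by
      rw [msrA_cons, msrA_cons, List.length_drop]; omega)]
  · simp only [if_neg hc1]
    by_cases hc2 : u1.headD 0 = u0.headD 0
    · simp only [if_pos hc2]
      rw [loopA_fuel _ _ _ _ _ (by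
        rw [msrA_cons, msrA_cons, List.length_drop, List.length_drop]; omega)]
    · simp only [if_neg hc2]
      by_cases he : (u0.drop 1).length = 0
      · simp only [if_pos he]
        rw [loopA_fuel _ _ _ _ _ (by rw [msrA_cons]; omega)]
      · simp only [if_neg he]
        rw [loopA_fuel _ _ _ _ _ (by
          rw [msrA_cons, msrA_cons, List.length_drop]; omega)]

theorem loopB_succ (f : Nat) (w0 w1 : List Int × Nat) (ws : List (List Int × Nat))
    (T2 : List Int) (tmp : Int) (i : Nat) :
    loopB (f + 1) (w0 :: w1 :: ws) T2 tmp i =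
      if w0.1.getD w0.2 0 = tmp then
        loopB f (if w0.2 + 1 < w0.1.length then insFresh (w0.1, w0.2 + 1) (w1 :: ws)
                 else (w1 :: ws)) T2 tmp i
      else if w1.1.getD w1.2 0 = w0.1.getD w0.2 0 then
        loopB f (if w0.2 + 1 < w0.1.length then
                   insFresh (w0.1, w0.2 + 1)
                     (if w1.2 + 1 < w1.1.length then insFresh (w1.1, w1.2 + 1) ws else ws)
                 else (if w1.2 + 1 < w1.1.length then insFresh (w1.1, w1.2 + 1) ws else ws))
          T2 (w0.1.getD w0.2 0) i
      else
        loopB f (if w0.2 + 1 < w0.1.length then insFresh (w0.1, w0.2 + 1) (w1 :: ws)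
                 else (w1 :: ws)) (T2.set i (w0.1.getD w0.2 0)) tmp (i + 1) := by
  simp only [loopB]

theorem FB_step (w0 w1 : List Int × Nat) (ws : List (List Int × Nat))
    (T2 : List Int) (tmp : Int) (i : Nat) :
    FB (w0 :: w1 :: ws) T2 tmp i =
      if w0.1.getD w0.2 0 = tmp then
        FB (Bstep w0.1 (w0.2 + 1) (w1 :: ws)) T2 tmp i
      else if w1.1.getD w1.2 0 = w0.1.getD w0.2 0 then
        FB (Bstep w0.1 (w0.2 + 1) (Bstep w1.1 (w1.2 + 1) ws)) T2 (w0.1.getD w0.2 0) i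
      else
        FB (Bstep w0.1 (w0.2 + 1) (w1 :: ws)) (T2.set i (w0.1.getD w0.2 0)) tmp (i + 1) := by
  have hm01 : msrB (w0 :: w1 :: ws)
      = (w0.1.length - w0.2 + 1) + ((w1.1.length - w1.2 + 1) + msrB ws) := by
    rw [msrB_cons, msrB_cons]
  unfold FB
  rw [loopB_succ (msrB (w0 :: w1 :: ws)) w0 w1 ws]
  simp only [Bstep]
  by_cases hc1 : w0.1.getD w0.2 0 = tmp
  · simp only [if_pos hc1]
    rw [loopB_fuel _ _ _ _ _ (by
      have hx := msrB_step_le w0.1 w0.2 (w1 :: ws)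
      rw [msrB_cons] at hx
      omega)]
  · simp only [if_neg hc1]
    by_cases hc2 : w1.1.getD w1.2 0 = w0.1.getD w0.2 0
    · simp only [if_pos hc2]
      rw [loopB_fuel _ _ _ _ _ (by
        have h1 := msrB_step_le w1.1 w1.2 ws
        have h0 := msrB_step_le w0.1 w0.2
          (if w1.2 + 1 < w1.1.length then insFresh (w1.1, w1.2 + 1) ws else ws)
        omega)]
    · simp only [if_neg hc2]
      rw [loopB_fuel _ _ _ _ _ (by
        have hx := msrB_step_le w0.1 w0.2 (w1 :: ws)
        rw [msrB_cons] at hx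
        omega)]

theorem projW_cons (a : List Int × Nat) (l : List (List Int × Nat)) :
    projW (a :: l) = a.1.drop a.2 :: projW l := rfl

theorem FA_nil (T2 : List Int) (tmp : Int) (i : Nat) : FA [] T2 tmp i = T2 := rfl

theorem FA_single (t0 : List Int) (T2 : List Int) (tmp : Int) (i : Nat) :
    FA [t0] T2 tmp i = writeRowA t0 i T2 := rfl

theorem FB_nil (T2 : List Int) (tmp : Int) (i : Nat) : FB [] T2 tmp i = T2 := rfl

theorem FB_single (w : List Int × Nat) (T2 : List Int) (tmp : Int) (i : Nat) :
    FB [w] T2 tmp i = writeRowB (w.1.drop w.2) i T2 := rfl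

theorem loopA_succ_empty0 (f : Nat) (t1 : List Int) (rest : List (List Int))
    (T2 : List Int) (tmp : Int) (i : Nat) :
    loopA (f + 1) ([] :: t1 :: rest) T2 tmp i = loopA f (t1 :: rest) T2 tmp i := by
  simp [loopA]

theorem loopA_succ_empty1 (f : Nat) (t0 : List Int) (rest : List (List Int))
    (T2 : List Int) (tmp : Int) (i : Nat) (h0 : t0.length ≠ 0) :
    loopA (f + 1) (t0 :: [] :: rest) T2 tmp i = loopA f (t0 :: rest) T2 tmp i := by
  have h0' : t0 ≠ [] := by intro h; subst h; simp at h0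
  simp [loopA, h0']

theorem FA_empty_front (rest : List (List Int)) (T2 : List Int) (tmp : Int) (i : Nat) :
    FA ([] :: rest) T2 tmp i = FA rest T2 tmp i := by
  cases rest with
  | nil =>
    rw [FA_single, FA_nil]
    rfl
  | cons r rs =>
    unfold FA
    rw [loopA_succ_empty0 (msrA ([] :: r :: rs))]
    rw [loopA_fuel _ _ _ _ _ (by simp only [msrA_cons, List.length_nil]; omega)]

theorem FA_empty_second (t0 : List Int) (rest : List (List Int)) (T2 : List Int)
    (tmp : Int) (i : Nat) (h0 : t0.length ≠ 0) :
    FA (t0 :: [] :: rest) T2 tmp i = FA (t0 :: rest) T2 tmp i := by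
  unfold FA
  rw [loopA_succ_empty1 (msrA (t0 :: [] :: rest)) t0 rest T2 tmp i h0]
  rw [loopA_fuel _ _ _ _ _ (by simp only [msrA_cons, List.length_nil]; omega)]

theorem msrA_state (r : List Int) (s : Nat) (l : List (List Int)) :
    msrA (r.drop s :: l) = (r.length - s) + 1 + msrA l := by
  rw [msrA_cons, List.length_drop]

theorem invW_tail {w : List Int × Nat} {ws : List (List Int × Nat)}
    (h : InvW (w :: ws)) : InvW ws :=
  ⟨(List.pairwise_cons.mp h.1).2, fun it hit => h.2 it (List.mem_cons_of_mem _ hit)⟩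

theorem invW_insFresh {it : List Int × Nat} {w : List (List Int × Nat)}
    (h : InvW w) (hit : it.2 < it.1.length) : InvW (insFresh it w) :=
  ⟨sorted_insFresh it w h.1, valid_insFresh it w h.2 hit⟩

-- the statement proved by strong induction on the measure
def PS (n : Nat) : Prop :=
  ∀ (work : List (List Int × Nat)) (T2 : List Int) (tmp : Int) (i : Nat), InvW work →
    (msrA (projW work) ≤ n → FA (projW work) T2 tmp i = FB work T2 tmp i)
    ∧ (∀ r0 s0, s0 ≤ r0.length → msrA (r0.drop s0 :: projW work) ≤ n →
        FA (r0.drop s0 :: projW work) T2 tmp i = FB (Bstep r0 s0 work) T2 tmp i)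
    ∧ (∀ r0 s0 r1 s1, s0 ≤ r0.length → s1 ≤ r1.length →
        msrA (r0.drop s0 :: r1.drop s1 :: projW work) ≤ n →
        FA (r0.drop s0 :: r1.drop s1 :: projW work) T2 tmp i
          = FB (Bstep r0 s0 (Bstep r1 s1 work)) T2 tmp i)

theorem stepSorted (n : Nat) (IH : ∀ m, m < n → PS m)
    (v0 v1 : List Int × Nat) (vs : List (List Int × Nat)) (T2 : List Int) (tmp : Int) (i : Nat)
    (hinv : InvW (v0 :: v1 :: vs)) (t0 t1 : List Int) (rest : List (List Int))
    (ht0 : t0.length ≠ 0) (ht1 : t1.length ≠ 0)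
    (hsort : sortRowsA (t0 :: t1 :: rest) = projW (v0 :: v1 :: vs))
    (hm : msrA (t0 :: t1 :: rest) ≤ n) :
    FA (t0 :: t1 :: rest) T2 tmp i = FB (v0 :: v1 :: vs) T2 tmp i := by
  have hval0 : v0.2 < v0.1.length := hinv.2 v0 (by simp)
  have hval1 : v1.2 < v1.1.length := hinv.2 v1 (by simp)
  have hsort' : sortRowsA (t0 :: t1 :: rest)
      = (v0.1.drop v0.2) :: (v1.1.drop v1.2) :: projW vs := by
    simpa [projW] using hsort
  have hmeq : msrA ((v0.1.drop v0.2) :: (v1.1.drop v1.2) :: projW vs)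
      = msrA (t0 :: t1 :: rest) := by
    rw [← hsort']; exact msrA_sortRowsA _
  have hu0 : (v0.1.drop v0.2).length ≠ 0 := by
    rw [List.length_drop]; omega
  have hu1 : (v1.1.drop v1.2).length ≠ 0 := by
    rw [List.length_drop]; omega
  rw [msrA_state, msrA_state] at hmeq
  have hn1 : 2 ≤ n := by omega
  have hinv1 : InvW (v1 :: vs) := invW_tail hinv
  have hinv2 : InvW vs := invW_tail hinv1
  have hh0 : v0.1.getD v0.2 0 = (v0.1.drop v0.2).headD 0 := getD_headD _ _
  have hh1 : v1.1.getD v1.2 0 = (v1.1.drop v1.2).headD 0 := getD_headD _ _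
  have hd0 : (v0.1.drop v0.2).drop 1 = v0.1.drop (v0.2 + 1) := by
    rw [List.drop_drop]
  have hd1 : (v1.1.drop v1.2).drop 1 = v1.1.drop (v1.2 + 1) := by
    rw [List.drop_drop]
  rw [FA_step t0 t1 _ _ rest (projW vs) T2 tmp i ht0 ht1 hsort' hu0]
  rw [FB_step v0 v1 vs]
  rw [hh0, hh1]
  by_cases hc1 : (v0.1.drop v0.2).headD 0 = tmp
  · simp only [if_pos hc1]
    obtain ⟨q1, q2, q3⟩ := IH (n - 1) (by omega) (v1 :: vs) T2 tmp i hinv1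
    rw [hd0]
    exact q2 v0.1 (v0.2 + 1) (by omega)
      (by rw [msrA_state, projW_cons, msrA_state]; omega)
  · simp only [if_neg hc1]
    by_cases hc2 : (v1.1.drop v1.2).headD 0 = (v0.1.drop v0.2).headD 0
    · simp only [if_pos hc2]
      obtain ⟨q1, q2, q3⟩ := IH (n - 1) (by omega) vs T2 ((v0.1.drop v0.2).headD 0) i hinv2
      rw [hd0, hd1]
      exact q3 v0.1 (v0.2 + 1) v1.1 (v1.2 + 1) (by omega) (by omega)
        (by rw [msrA_state, msrA_state]; omega)
    · simp only [if_neg hc2]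
      by_cases hrem : v0.2 + 1 < v0.1.length
      · have hne : ¬ ((v0.1.drop v0.2).drop 1).length = 0 := by
          rw [hd0, List.length_drop]; omega
        rw [if_neg hne, hd0]
        obtain ⟨q1, q2, q3⟩ := IH (n - 1) (by omega) (v1 :: vs) (T2.set i ((v0.1.drop v0.2).headD 0)) tmp (i + 1) hinv1
        exact q2 v0.1 (v0.2 + 1) (by omega)
          (by rw [msrA_state, projW_cons, msrA_state]; omega)
      · have he : ((v0.1.drop v0.2).drop 1).length = 0 := by
          rw [hd0, List.length_drop]; omega
        rw [if_pos he]
        have hbs : Bstep v0.1 (v0.2 + 1) (v1 :: vs) = v1 :: vs := by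
          simp [Bstep, hrem]
        rw [hbs]
        obtain ⟨q1, q2, q3⟩ := IH (n - 1) (by omega) (v1 :: vs) (T2.set i ((v0.1.drop v0.2).headD 0)) tmp (i + 1) hinv1
        exact q1 (by rw [projW_cons, msrA_state]; omega)

theorem length_insFresh (it : List Int × Nat) (w : List (List Int × Nat)) :
    (insFresh it w).length = w.length + 1 := by
  induction w with
  | nil => rfl
  | cons x xs ih =>
    simp only [insFresh]
    split
    · simp [ih]
    · simp

theorem psQ2 (n : Nat) (IH : ∀ m, m < n → PS m) (work : List (List Int × Nat))
    (T2 : List Int) (tmp : Int) (i : Nat) (hinv : InvW work) :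
    ∀ r0 s0, s0 ≤ r0.length → msrA (r0.drop s0 :: projW work) ≤ n →
      FA (r0.drop s0 :: projW work) T2 tmp i = FB (Bstep r0 s0 work) T2 tmp i := by
  intro r0 s0 hs0 hm
  by_cases hfull : s0 < r0.length
  · cases work with
    | nil =>
      have hb : Bstep r0 s0 ([] : List (List Int × Nat)) = [(r0, s0)] := by
        simp [Bstep, hfull, insFresh]
      rw [hb]
      show FA [r0.drop s0] T2 tmp i = FB [(r0, s0)] T2 tmp i
      rw [FA_single, FB_single, writeAB]
    | cons w ws =>
      have hb : Bstep r0 s0 (w :: ws) = insFresh (r0, s0) (w :: ws) := by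
        simp [Bstep, hfull]
      rw [hb, projW_cons]
      obtain ⟨v0, v1, vs, hv⟩ :
          ∃ v0 v1 vs, insFresh (r0, s0) (w :: ws) = v0 :: v1 :: vs := by
        have hlen : (insFresh (r0, s0) (w :: ws)).length = ws.length + 2 := by
          rw [length_insFresh]; simp
        cases hI : insFresh (r0, s0) (w :: ws) with
        | nil => rw [hI] at hlen; simp at hlen
        | cons a tl =>
          cases tl with
          | nil => rw [hI] at hlen; simp at hlen
          | cons b c => exact ⟨a, b, c, rfl⟩
      rw [hv]
      have hwv : w.2 < w.1.length := hinv.2 w (by simp)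
      apply stepSorted n IH v0 v1 vs T2 tmp i
      · rw [← hv]; exact invW_insFresh hinv (by simpa using hfull)
      · rw [List.length_drop]; omega
      · rw [List.length_drop]; omega
      · rw [← hv, proj_insFresh]
        exact sortS2 _ _ (sortedR_proj _ hinv.1)
      · exact hm
  · have hdrop : r0.drop s0 = [] := List.drop_eq_nil_of_le (by omega)
    have hb : Bstep r0 s0 work = work := by simp [Bstep, hfull]
    rw [hdrop, hb, FA_empty_front]
    cases work with
    | nil =>
      show FA [] T2 tmp i = FB [] T2 tmp i
      rw [FA_nil, FB_nil]
    | cons w ws =>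
      have hw : w.2 < w.1.length := hinv.2 w (by simp)
      rw [hdrop] at hm
      have hm' : msrA (projW (w :: ws)) ≤ n - 1 ∧ 1 ≤ n := by
        rw [msrA_cons] at hm; constructor <;> omega
      obtain ⟨q1', q2', q3'⟩ :=
        IH (n - 1) (by omega) ws T2 tmp i (invW_tail hinv)
      rw [projW_cons]
      rw [q2' w.1 w.2 (le_of_lt hw) (by
        have := hm'.1; rw [projW_cons] at this; exact this)]
      have hbw : Bstep w.1 w.2 ws = w :: ws := by
        simp only [Bstep, if_pos hw]
        rw [insFresh_min _ _ (fun u hu => (List.pairwise_cons.mp hinv.1).1 u hu)]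
      rw [hbw]

theorem psQ1 (n : Nat) (IH : ∀ m, m < n → PS m) (work : List (List Int × Nat))
    (T2 : List Int) (tmp : Int) (i : Nat) (hinv : InvW work) :
    msrA (projW work) ≤ n → FA (projW work) T2 tmp i = FB work T2 tmp i := by
  intro hm
  cases work with
  | nil =>
    show FA [] T2 tmp i = FB [] T2 tmp i
    rw [FA_nil, FB_nil]
  | cons w ws =>
    have hw : w.2 < w.1.length := hinv.2 w (by simp)
    rw [projW_cons] at hm ⊢
    rw [psQ2 n IH ws T2 tmp i (invW_tail hinv) w.1 w.2 (le_of_lt hw) hm]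
    have hbw : Bstep w.1 w.2 ws = w :: ws := by
      simp only [Bstep, if_pos hw]
      rw [insFresh_min _ _ (fun u hu => (List.pairwise_cons.mp hinv.1).1 u hu)]
    rw [hbw]

theorem psQ3 (n : Nat) (IH : ∀ m, m < n → PS m) (work : List (List Int × Nat))
    (T2 : List Int) (tmp : Int) (i : Nat) (hinv : InvW work) :
    ∀ r0 s0 r1 s1, s0 ≤ r0.length → s1 ≤ r1.length →
      msrA (r0.drop s0 :: r1.drop s1 :: projW work) ≤ n →
      FA (r0.drop s0 :: r1.drop s1 :: projW work) T2 tmp i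
        = FB (Bstep r0 s0 (Bstep r1 s1 work)) T2 tmp i := by
  intro r0 s0 r1 s1 hs0 hs1 hm
  by_cases hf0 : s0 < r0.length
  · by_cases hf1 : s1 < r1.length
    · have hb1 : Bstep r1 s1 work = insFresh (r1, s1) work := by simp [Bstep, hf1]
      have hb0 : Bstep r0 s0 (insFresh (r1, s1) work)
          = insFresh (r0, s0) (insFresh (r1, s1) work) := by simp [Bstep, hf0]
      rw [hb1, hb0]
      obtain ⟨v0, v1, vs, hv⟩ :
          ∃ v0 v1 vs, insFresh (r0, s0) (insFresh (r1, s1) work) = v0 :: v1 :: vs := by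
        have hlen : (insFresh (r0, s0) (insFresh (r1, s1) work)).length
            = work.length + 2 := by
          rw [length_insFresh, length_insFresh]
        cases hI : insFresh (r0, s0) (insFresh (r1, s1) work) with
        | nil => rw [hI] at hlen; simp at hlen
        | cons a tl =>
          cases tl with
          | nil => rw [hI] at hlen; simp at hlen
          | cons b c => exact ⟨a, b, c, rfl⟩
      rw [hv]
      apply stepSorted n IH v0 v1 vs T2 tmp i
      · rw [← hv]
        exact invW_insFresh (invW_insFresh hinv (by simpa using hf1)) (by simpa using hf0)
      · rw [List.length_drop]; omega
      · rw [List.length_drop]; omega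
      · rw [← hv, proj_insFresh, proj_insFresh]
        exact sortS3 _ _ _ (sortedR_proj _ hinv.1)
      · exact hm
    · have hd1 : r1.drop s1 = [] := List.drop_eq_nil_of_le (by omega)
      have hb1 : Bstep r1 s1 work = work := by simp [Bstep, hf1]
      rw [hd1, hb1, FA_empty_second _ _ _ _ _ (by rw [List.length_drop]; omega)]
      exact psQ2 n IH work T2 tmp i hinv r0 s0 hs0 (by
        rw [hd1, msrA_state, msrA_cons, List.length_nil] at hm
        rw [msrA_state]; omega)
  · have hd0 : r0.drop s0 = [] := List.drop_eq_nil_of_le (by omega)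
    have hb0 : Bstep r0 s0 (Bstep r1 s1 work) = Bstep r1 s1 work := by
      simp [Bstep, hf0]
    rw [hd0, hb0, FA_empty_front]
    exact psQ2 n IH work T2 tmp i hinv r1 s1 hs1 (by
      rw [hd0, msrA_cons, List.length_nil, msrA_state] at hm
      rw [msrA_state]; omega)

theorem mainPS (n : Nat) : PS n := by
  induction n using Nat.strong_induction_on with
  | _ n IH =>
    unfold PS
    intro work T2 tmp i hinv
    exact ⟨psQ1 n IH work T2 tmp i hinv, psQ2 n IH work T2 tmp i hinv,
      psQ3 n IH work T2 tmp i hinv⟩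

theorem proj_insStable (it : List Int × Nat) (w : List (List Int × Nat)) :
    projW (insStable it w) = insRowA (it.1.drop it.2) (projW w) := by
  induction w with
  | nil => simp [insStable, insRowA, projW]
  | cons w0 ws ih =>
    by_cases h : headP w0 ≤ headP it
    · have h' : ¬ (it.1.drop it.2).headD 0 < (w0.1.drop w0.2).headD 0 := by
        rw [← headP_proj, ← headP_proj]; omega
      simp only [insStable]
      rw [if_pos h, projW_cons, projW_cons, ih]
      simp only [insRowA]
      rw [if_neg h']
    · have h' : (it.1.drop it.2).headD 0 < (w0.1.drop w0.2).headD 0 := by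
        rw [← headP_proj, ← headP_proj]; omega
      simp only [insStable]
      rw [if_neg h, projW_cons, projW_cons]
      simp only [insRowA]
      rw [if_pos h']

theorem mem_insStable {x it : List Int × Nat} {w : List (List Int × Nat)}
    (h : x ∈ insStable it w) : x = it ∨ x ∈ w := by
  induction w with
  | nil => simpa [insStable] using h
  | cons y ys ih =>
    simp only [insStable] at h
    split at h
    · rcases List.mem_cons.mp h with h | h
      · exact Or.inr (by simp [h])
      · rcases ih h with h | h
        · exact Or.inl h
        · exact Or.inr (by simp [h])
    · rcases List.mem_cons.mp h with h | h
      · exact Or.inl h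
      · exact Or.inr h

theorem sorted_insStable (it : List Int × Nat) (w : List (List Int × Nat))
    (h : SortedW w) : SortedW (insStable it w) := by
  induction w with
  | nil => simp [insStable, SortedW]
  | cons x xs ih =>
    rcases (List.pairwise_cons.mp h) with ⟨hx, hxs⟩
    simp only [insStable]
    split
    · rename_i hle
      refine List.pairwise_cons.mpr ⟨?_, ih hxs⟩
      intro u hu
      rcases mem_insStable hu with rfl | hu
      · exact hle
      · exact hx u hu
    · rename_i hgt
      refine List.pairwise_cons.mpr ⟨?_, h⟩
      intro u hu
      rcases List.mem_cons.mp hu with rfl | hu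
      · omega
      · exact le_trans (by omega) (hx u hu)

theorem valid_insStable (it : List Int × Nat) (w : List (List Int × Nat))
    (h : ValidW w) (hit : it.2 < it.1.length) : ValidW (insStable it w) := by
  intro u hu
  rcases mem_insStable hu with rfl | hu
  · exact hit
  · exact h u hu

theorem invW_nil : InvW [] := ⟨List.Pairwise.nil, by intro it h; cases h⟩

theorem sortRowsA_eq_foldl (t : List (List Int)) :
    sortRowsA t = t.foldl (fun acc x => insRowA x acc) [] := by
  cases t <;> rfl

theorem buildB_general (t : List (List Int)) :
    ∀ acc : List (List Int × Nat), (∀ r ∈ t, r ≠ []) → InvW acc →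
    projW (t.foldl (fun work row => if row.length = 0 then work else insStable (row, 0) work) acc)
      = t.foldl (fun a x => insRowA x a) (projW acc)
    ∧ InvW (t.foldl (fun work row => if row.length = 0 then work else insStable (row, 0) work) acc) := by
  induction t with
  | nil => exact fun acc _ hacc => ⟨rfl, hacc⟩
  | cons row rows ih =>
    intro acc hne hacc
    have hrow : row ≠ [] := hne row (by simp)
    have hlen : ¬ row.length = 0 := by simpa using hrow
    simp only [List.foldl_cons, if_neg hlen]
    have hacc' : InvW (insStable (row, 0) acc) :=
      ⟨sorted_insStable _ _ hacc.1,
       valid_insStable _ _ hacc.2 (by simpa using List.length_pos_of_ne_nil hrow)⟩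
    obtain ⟨h1, h2⟩ := ih (insStable (row, 0) acc)
      (fun r hr => hne r (by simp [hr])) hacc'
    refine ⟨?_, h2⟩
    rw [h1, proj_insStable]
    simp

theorem buildB_proj (t : List (List Int)) (h : ∀ r ∈ t, r ≠ []) :
    projW (buildB t) = sortRowsA t := by
  rw [sortRowsA_eq_foldl]
  have := (buildB_general t [] h invW_nil).1
  simpa [buildB, projW] using this

theorem buildB_inv (t : List (List Int)) (h : ∀ r ∈ t, r ≠ []) : InvW (buildB t) :=
  (buildB_general t [] h invW_nil).2

theorem initAB (t : List (List Int)) (ht : ∀ r ∈ t, r ≠ []) (T2 : List Int)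
    (tmp : Int) (i : Nat) : FA t T2 tmp i = FB (buildB t) T2 tmp i := by
  cases t with
  | nil =>
    show FA [] T2 tmp i = FB [] T2 tmp i
    rw [FA_nil, FB_nil]
  | cons t0 tl =>
    cases tl with
    | nil =>
      have h0 : t0 ≠ [] := ht t0 (by simp)
      have hlen : ¬ t0.length = 0 := by simpa using h0
      have hb : buildB [t0] = [(t0, 0)] := by
        simp [buildB, h0, insStable]
      rw [hb, FA_single, FB_single]
      simpa using writeAB t0 i T2
    | cons t1 rest =>
      have hinvB := buildB_inv (t0 :: t1 :: rest) ht
      have hproj := buildB_proj (t0 :: t1 :: rest) ht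
      obtain ⟨v0, v1, vs, hv⟩ :
          ∃ v0 v1 vs, buildB (t0 :: t1 :: rest) = v0 :: v1 :: vs := by
        have hlen : (buildB (t0 :: t1 :: rest)).length = rest.length + 2 := by
          have h1 := congrArg List.length hproj
          have hp := (sortRowsA_perm (t0 :: t1 :: rest)).length_eq
          simp [projW] at h1 hp
          omega
        cases hB : buildB (t0 :: t1 :: rest) with
        | nil => rw [hB] at hlen; simp at hlen
        | cons a tl2 =>
          cases tl2 with
          | nil => rw [hB] at hlen; simp at hlen
          | cons b c => exact ⟨a, b, c, rfl⟩
      rw [hv]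
      apply stepSorted (msrA (t0 :: t1 :: rest)) (fun m _ => mainPS m) v0 v1 vs T2 tmp i
      · rw [← hv]; exact hinvB
      · simpa using ht t0 (by simp)
      · simpa using ht t1 (by simp)
      · rw [← hv]; exact hproj.symm
      · exact le_refl _

-- empty rows A tolerates are exactly those it strips before the first sort
def filterNE (t : List (List Int)) : List (List Int) := t.filter (fun r => !r.isEmpty)

def OKE (t : List (List Int)) : Prop :=
  ∀ k, k < t.length → t.getD k [] = [] →
    ((t.take k).filter (fun r => !r.isEmpty)).length ≤ 1

theorem oke_tail {t0 : List Int} {tl : List (List Int)} (h : OKE (t0 :: tl)) : OKE tl := by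
  intro k hk hke
  have h2 := h (k + 1) (by simpa using hk) (by simpa using hke)
  simp only [List.take_succ_cons, List.filter_cons] at h2
  split at h2
  · simp only [List.length_cons] at h2; omega
  · exact h2

theorem oke_drop_empty1 {t0 : List Int} {tl : List (List Int)}
    (h : OKE (t0 :: [] :: tl)) : OKE (t0 :: tl) := by
  intro k hk hke
  cases k with
  | zero => simp
  | succ m =>
    have h2 := h (m + 2) (by simpa using hk) (by simpa using hke)
    simp only [List.take_succ_cons, List.filter_cons] at h2 ⊢
    simpa using h2

theorem filterNE_eq_self {t : List (List Int)} (h : ∀ r ∈ t, r ≠ []) : filterNE t = t := by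
  unfold filterNE
  rw [List.filter_eq_self]
  intro r hr
  simpa using h r hr

theorem oke_all_nonempty {t0 t1 : List Int} {rest : List (List Int)}
    (h : OKE (t0 :: t1 :: rest)) (h0 : t0 ≠ []) (h1 : t1 ≠ []) :
    ∀ r ∈ rest, r ≠ [] := by
  intro r hr hre
  subst hre
  obtain ⟨j, hj, hget⟩ := List.mem_iff_getElem.mp hr
  have h2 := h (j + 2) (by simpa using hj) (by
    have : rest.getD j [] = [] := by
      rw [List.getD_eq_getElem _ _ hj, hget]
    simpa using this)
  simp only [List.take_succ_cons, List.filter_cons] at h2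
  simp [h0, h1] at h2

theorem FA_filter (t : List (List Int)) (T2 : List Int) (tmp : Int) (i : Nat)
    (h : OKE t) : FA t T2 tmp i = FA (filterNE t) T2 tmp i := by
  match t with
  | [] => rfl
  | [x] =>
    by_cases hx : x = []
    · subst hx
      show FA [[]] T2 tmp i = FA [] T2 tmp i
      rw [FA_single, FA_nil]
      rfl
    · rw [filterNE_eq_self (by intro r hr; simp only [List.mem_singleton] at hr; subst hr; exact hx)]
  | t0 :: t1 :: rest =>
    by_cases h0 : t0 = []
    · subst h0
      rw [FA_empty_front]
      have he : filterNE ([] :: t1 :: rest) = filterNE (t1 :: rest) := by simp [filterNE]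
      rw [he]
      exact FA_filter (t1 :: rest) T2 tmp i (oke_tail h)
    · by_cases h1 : t1 = []
      · subst h1
        rw [FA_empty_second _ _ _ _ _ (by simpa using h0)]
        have he : filterNE (t0 :: [] :: rest) = filterNE (t0 :: rest) := by
          simp [filterNE, List.filter_cons]
        rw [he]
        exact FA_filter (t0 :: rest) T2 tmp i (oke_drop_empty1 h)
      · have hall : ∀ r ∈ rest, r ≠ [] := oke_all_nonempty h h0 h1
        rw [filterNE_eq_self (by
          intro r hr
          rcases List.mem_cons.mp hr with rfl | hr
          · exact h0
          rcases List.mem_cons.mp hr with rfl | hr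
          · exact h1
          · exact hall r hr)]
termination_by t.length

theorem buildB_filter (t : List (List Int)) : buildB t = buildB (filterNE t) := by
  unfold buildB
  suffices hgen : ∀ (u : List (List Int)) (acc : List (List Int × Nat)),
      u.foldl (fun work row => if row.length = 0 then work else insStable (row, 0) work) acc
        = (filterNE u).foldl
            (fun work row => if row.length = 0 then work else insStable (row, 0) work) acc by
    exact hgen t []
  intro u
  induction u with
  | nil => intro acc; rfl
  | cons r rs ih =>
    intro acc
    by_cases hr : r = []
    · subst hr
      simp only [List.foldl_cons, List.length_nil, filterNE, List.filter_cons,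
        List.isEmpty_nil, Bool.not_true]
      exact ih acc
    · have hlen : ¬ r.length = 0 := by simpa using hr
      have hne : (!r.isEmpty) = true := by simpa using hr
      simp only [List.foldl_cons, if_neg hlen, filterNE, List.filter_cons, hne, if_true]
      exact ih (insStable (r, 0) acc)

-- ===== VERDICT (by name: the statement is the Claim_ definition above) =====
theorem ex6_spec : Claim_equal_ex6 := by
  unfold Claim_equal_ex6
  intro t T2 _hdom hpre
  unfold Spec_ex6
  unfold Pre_ex6 at hpre
  show FA t T2 (-1) 0 = FB (buildB t) T2 (-1) 0
  rw [FA_filter t T2 (-1) 0 hpre.2.1, buildB_filter t]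
  refine initAB (filterNE t) ?_ T2 (-1) 0
  intro r hr
  have := List.of_mem_filter hr
  simpa using this
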